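-- pv_equiv track=rewrite | github.com/rwchapmanii/AcquittifyWorkspace | scripts/nightly_caselaw_ingest.py | order_federal_courts
-- ===== SOURCE A (Python) =====
-- from typing import Any, Iterable
--
-- PRIORITY_COURTS = ("scotus", "cafc")
--
-- def order_federal_courts(court_ids: Iterable[str]) -> list[str]:
--     seen: set[str] = set()
--     unique_ids: list[str] = []
--     for court_id in court_ids:
--         normalized = str(court_id or "").strip().lower()
--         if not normalized or normalized in seen:
--             continue
--         seen.add(normalized)
--         unique_ids.append(normalized)
--
--     priority = [court for court in PRIORITY_COURTS if court in seen]
--     remaining = sorted(court for court in unique_ids if court not in PRIORITY_COURTS)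
--     return priority + remaining
-- ===== SOURCE B (Python) =====
-- PRIORITY_COURTS = ("scotus", "cafc")
--
-- def order_federal_courts(court_ids):
--     normalized = (str(c or "").strip().lower() for c in court_ids)
--     unique_ids = list(dict.fromkeys(n for n in normalized if n))
--
--     def sort_key(court):
--         if court in PRIORITY_COURTS:
--             return (PRIORITY_COURTS.index(court), "")
--         return (len(PRIORITY_COURTS), court)
--
--     return sorted(unique_ids, key=sort_key)
-- ===== Notes on version B (the rewrite author's own statement) =====
-- stated objective: alternative
-- what changed: B dedupes via dict.fromkeys over a normalized/filtered generator instead of A's manual seen-set loop, and replaces A's partition-into-priority-and-rest plus concatenation with a single sorted() call using a composite (priority-tier-index, id) key.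
import Mathlib
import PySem

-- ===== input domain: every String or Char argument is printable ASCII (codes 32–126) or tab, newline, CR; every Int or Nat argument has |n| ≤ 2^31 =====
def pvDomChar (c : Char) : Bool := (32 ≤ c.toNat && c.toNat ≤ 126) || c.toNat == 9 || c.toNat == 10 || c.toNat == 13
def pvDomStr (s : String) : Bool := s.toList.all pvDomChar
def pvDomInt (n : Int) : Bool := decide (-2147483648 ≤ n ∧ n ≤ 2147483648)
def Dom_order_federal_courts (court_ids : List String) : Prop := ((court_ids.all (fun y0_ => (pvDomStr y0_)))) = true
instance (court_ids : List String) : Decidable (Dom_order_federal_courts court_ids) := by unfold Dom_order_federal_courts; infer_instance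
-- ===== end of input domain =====

-- B keeps A's normalize/dedupe semantics via a dict.fromkeys-style dedup and replaces the
-- partition-plus-concatenate ordering with a single keyed sort (priority tier, then id);
-- objective: alternative decomposition, same asymptotic cost.


-- PRIORITY_COURTS = ("scotus", "cafc")
def pvPriorityCourts : List String := ["scotus", "cafc"]

-- str(court_id or "").strip().lower() — for a str argument, 'court_id or ""' is court_id itself
-- when nonempty and "" when empty, so this is .strip().lower()
def pvNorm (s : String) : String := PySem.Str.lower (PySem.Str.strip s)

-- ===== PORT A =====
def order_federal_courts (court_ids : List String) : List String :=
  let st := court_ids.foldl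
    (fun (st : PySem.Set String × List String) court_id =>
      let normalized := pvNorm court_id
      if normalized = "" ∨ PySem.Set.contains st.1 normalized then st
      else (PySem.Set.add st.1 normalized, st.2 ++ [normalized]))
    (PySem.Set.empty, [])
  let priority := pvPriorityCourts.filter (fun court => PySem.Set.contains st.1 court)
  let remaining := PySem.List.sorted (st.2.filter (fun court => decide (court ∉ pvPriorityCourts))) (fun c => c) false
  priority ++ remaining

-- ===== PORT B =====
def pvSortKey (court : String) : Int ×ₗ String :=
  if court ∈ pvPriorityCourts then
    toLex ((((PySem.List.index? pvPriorityCourts court).getD 0 : Nat) : Int), "")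
  else
    toLex ((pvPriorityCourts.length : Int), court)

def order_federal_courts_alt (court_ids : List String) : List String :=
  let unique_ids := PySem.List.dedup ((court_ids.map pvNorm).filter (fun n => decide (n ≠ "")))
  PySem.List.sorted unique_ids pvSortKey false

-- ===== PRECONDITION & SPEC =====
def Spec_order_federal_courts (court_ids : List String) (out : List String) : Prop := out = order_federal_courts_alt court_ids
instance (court_ids : List String) (out : List String) : Decidable (Spec_order_federal_courts court_ids out) := by unfold Spec_order_federal_courts; infer_instance

-- ===== CLAIM (what is proved, stated in full; the proofs are below) =====
def Claim_equal_order_federal_courts : Prop := ∀ (court_ids : List String), Dom_order_federal_courts court_ids → Spec_order_federal_courts court_ids (order_federal_courts court_ids)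

-- ===== LEMMAS AND PROOFS =====

-- A's loop keeps 'seen' and 'unique_ids' equal (both start empty and are extended together),
-- and together they fold Set.add over the nonempty normalized ids.
theorem foldA_eq (xs : List String) (s : PySem.Set String) :
    xs.foldl
      (fun (st : PySem.Set String × List String) court_id =>
        let normalized := pvNorm court_id
        if normalized = "" ∨ PySem.Set.contains st.1 normalized then st
        else (PySem.Set.add st.1 normalized, st.2 ++ [normalized]))
      (s, s)
    = (((xs.map pvNorm).filter (fun n => decide (n ≠ ""))).foldl PySem.Set.add s,
       ((xs.map pvNorm).filter (fun n => decide (n ≠ ""))).foldl PySem.Set.add s) := by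
  induction xs generalizing s with
  | nil => rfl
  | cons x xs ih =>
    simp only [List.foldl_cons, List.map_cons, List.filter_cons]
    by_cases hx : pvNorm x = ""
    · simpa [hx] using ih s
    · by_cases hm : pvNorm x ∈ s
      · have hc : PySem.Set.contains s (pvNorm x) = true := (PySem.Set.contains_iff s _).mpr hm
        simpa [hx, hc, hm, PySem.Set.add_of_mem hm] using ih s
      · have hc : PySem.Set.contains s (pvNorm x) = false := by
          cases h : PySem.Set.contains s (pvNorm x)
          · rfl
          · exact absurd ((PySem.Set.contains_iff s _).mp h) hm
        simpa [hx, hc, hm, PySem.Set.add_of_not_mem hm] using ih (s ++ [pvNorm x])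

theorem key_scotus : pvSortKey "scotus" = toLex ((0 : Int), "") := by decide

theorem key_cafc : pvSortKey "cafc" = toLex ((1 : Int), "") := by decide

theorem key_other {c : String} (h : c ∉ pvPriorityCourts) : pvSortKey c = toLex ((2 : Int), c) := by
  unfold pvSortKey
  rw [if_neg h]
  rfl

-- B's single keyed sort reproduces A's "priority prefix ++ alphabetical rest" on a duplicate-free list.
theorem main_eq (u : List String) (hu : u.Nodup) :
    PySem.List.sorted u pvSortKey false
      = pvPriorityCourts.filter (fun court => PySem.Set.contains u court)
        ++ PySem.List.sorted (u.filter (fun court => decide (court ∉ pvPriorityCourts))) (fun c => c) false := by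
  have hmem_rest : ∀ b ∈ PySem.List.sorted (u.filter (fun court => decide (court ∉ pvPriorityCourts))) (fun c : String => c) false,
      b ∈ u ∧ b ∉ pvPriorityCourts := by
    intro b hb
    have := (PySem.List.mem_sorted _ _ _ _).mp hb
    simpa using List.mem_filter.mp this
  have hmem_prio : ∀ a ∈ pvPriorityCourts.filter (fun court => PySem.Set.contains u court),
      a ∈ pvPriorityCourts := by
    intro a ha
    exact (List.mem_filter.mp ha).1
  apply PySem.List.sorted_eq_of_perm_of_pairwise_lt
  · -- permutation: priority prefix ++ sorted rest rearranges u
    have h1 : (u.filter (fun c => decide (c ∈ pvPriorityCourts))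
        ++ u.filter (fun c => decide (c ∉ pvPriorityCourts))).Perm u := by
      simpa using List.filter_append_perm (fun c => decide (c ∈ pvPriorityCourts)) u
    have h2 : (pvPriorityCourts.filter (fun court => PySem.Set.contains u court)).Perm
        (u.filter (fun c => decide (c ∈ pvPriorityCourts))) := by
      apply (List.perm_ext_iff_of_nodup ?_ ?_).mpr
      · intro x
        simp only [List.mem_filter, decide_eq_true_eq, PySem.Set.contains_iff]
        tauto
      · exact List.Nodup.filter _ (by decide)
      · exact List.Nodup.filter _ hu
    have h3 : (PySem.List.sorted (u.filter (fun court => decide (court ∉ pvPriorityCourts))) (fun c : String => c) false).Perm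
        (u.filter (fun c => decide (c ∉ pvPriorityCourts))) :=
      PySem.List.sorted_perm _ _ _
    exact (h2.append h3).trans h1
  · -- pairwise strictly increasing keys along the target list
    apply List.pairwise_append.mpr
    refine ⟨?_, ?_, ?_⟩
    · -- within the priority prefix: a sublist of ["scotus", "cafc"], whose keys increase
      have hPP : List.Pairwise (fun a b => pvSortKey a < pvSortKey b) pvPriorityCourts := by
        refine List.pairwise_cons.mpr ⟨?_, List.pairwise_singleton _ _⟩
        intro b hb
        have : b = "cafc" := by simpa using hb
        subst this
        rw [key_scotus, key_cafc]
        exact Prod.Lex.toLex_lt_toLex.mpr (Or.inl (by norm_num))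
      exact hPP.sublist List.filter_sublist
    · -- within the sorted remainder: sorted and duplicate-free, hence strictly increasing
      have hle := PySem.List.sorted_pairwise (u.filter (fun court => decide (court ∉ pvPriorityCourts))) (fun c : String => c)
      have hnd : (PySem.List.sorted (u.filter (fun court => decide (court ∉ pvPriorityCourts))) (fun c : String => c) false).Nodup :=
        (PySem.List.sorted_perm _ _ _).nodup_iff.mpr (List.Nodup.filter _ hu)
      have hlt := (hle.and hnd).imp (fun h => lt_of_le_of_ne h.1 h.2)
      refine List.Pairwise.imp_of_mem ?_ hlt
      intro a b ha hb hab
      rw [key_other (hmem_rest a ha).2, key_other (hmem_rest b hb).2]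
      exact Prod.Lex.toLex_lt_toLex.mpr (Or.inr ⟨rfl, hab⟩)
    · -- across: every priority key is below every remainder key
      intro a ha b hb
      have hA := hmem_prio a ha
      have hB := (hmem_rest b hb).2
      rw [key_other hB]
      have : a = "scotus" ∨ a = "cafc" := by simpa [pvPriorityCourts] using hA
      rcases this with h | h <;> subst h
      · rw [key_scotus]
        exact Prod.Lex.toLex_lt_toLex.mpr (Or.inl (show (0 : Int) < 2 by norm_num))
      · rw [key_cafc]
        exact Prod.Lex.toLex_lt_toLex.mpr (Or.inl (show (1 : Int) < 2 by norm_num))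

-- ===== VERDICT (by name: the statement is the Claim_ definition above) =====
theorem order_federal_courts_spec : Claim_equal_order_federal_courts := by
  intro court_ids _
  unfold Spec_order_federal_courts order_federal_courts order_federal_courts_alt
  have hfold := foldA_eq court_ids PySem.Set.empty
  simp only [PySem.Set.empty] at hfold ⊢
  rw [hfold]
  rw [PySem.List.dedup_eq_ofList, PySem.Set.ofList_eq_foldl]
  have hu : (((court_ids.map pvNorm).filter (fun n => decide (n ≠ ""))).foldl PySem.Set.add ([] : List String)).Nodup := by
    rw [← PySem.Set.ofList_eq_foldl]
    exact PySem.Set.nodup_ofList _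
  exact (main_eq _ hu).symm
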